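-- pv_equiv track=rewrite | github.com/epsalt/aoc2018 | day02.py | reps
-- ===== SOURCE A (Python) =====
-- from collections import Counter
--
-- def reps(lines, n):
--     out = 0
--
--     for line in lines:
--         cnt = Counter()
--
--         for letter in line:
--             cnt[letter] += 1
--
--         if n in set(cnt.values()):
--             out += 1
--
--     return out
-- ===== SOURCE B (Python) =====
-- def reps(lines, n):
--     out = 0
--     for line in lines:
--         s = sorted(line)
--         i = 0
--         while i < len(s):
--             j = i + 1
--             while j < len(s) and s[j] == s[i]:
--                 j += 1
--             if j - i == n:
--                 out += 1
--                 break
--             i = j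
--     return out
-- ===== Notes on version B (the rewrite author's own statement) =====
-- stated objective: alternative
-- what changed: Replaces the Counter frequency table with sort-then-scan: each line's characters are sorted and a two-index while loop walks maximal runs of equal characters, counting the line as soon as a run of length exactly n is found (early exit); no dictionary or frequency table is ever built.
import Mathlib
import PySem

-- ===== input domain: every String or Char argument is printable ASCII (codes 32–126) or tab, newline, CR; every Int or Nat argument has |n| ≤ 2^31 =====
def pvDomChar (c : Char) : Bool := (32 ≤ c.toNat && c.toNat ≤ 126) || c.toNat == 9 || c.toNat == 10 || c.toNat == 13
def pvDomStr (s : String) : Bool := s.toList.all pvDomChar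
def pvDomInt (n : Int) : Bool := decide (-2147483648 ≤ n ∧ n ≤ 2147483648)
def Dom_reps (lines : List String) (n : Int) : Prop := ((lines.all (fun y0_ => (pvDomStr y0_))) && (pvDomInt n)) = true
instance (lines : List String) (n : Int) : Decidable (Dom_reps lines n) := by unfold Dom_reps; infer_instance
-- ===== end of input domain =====

-- B replaces A's Counter frequency table by sort-then-scan: the line's characters are
-- sorted and maximal runs of equal characters are walked, stopping at a run of length n.

-- ===== PORT A =====
def reps (lines : List String) (n : Int) : Int :=
  lines.foldl (fun out line =>
    let cnt : PySem.Dict Char Int :=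
      line.toList.foldl (fun d letter => d.modify letter 0 (· + 1)) PySem.Dict.empty
    if PySem.Set.contains (PySem.Set.ofList cnt.values) n then out + 1 else out) 0

-- ===== PORT B =====
-- the inner while loop advancing j over the run of characters equal to s[i] is
-- transcribed as takeWhile/dropWhile on the suffix; the outer while i < len(s)
-- (with the break) is the structural recursion on the remaining suffix
def repsScan (n : Int) : List Char → Bool
  | [] => false
  | c :: rest =>
      let run := rest.takeWhile (fun x => x == c)
      if ((1 : Int) + run.length) == n then true
      else repsScan n (rest.dropWhile (fun x => x == c))
termination_by s => s.length
decreasing_by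
  simp only [List.length_cons]
  exact Nat.lt_succ_of_le (List.length_dropWhile_le _ _)

def reps_alt (lines : List String) (n : Int) : Int :=
  lines.foldl (fun out line =>
    if repsScan n (PySem.List.sorted line.toList (fun x => x) false) then out + 1 else out) 0

-- ===== PRECONDITION & SPEC =====
def Spec_reps (lines : List String) (n : Int) (out : Int) : Prop := out = reps_alt lines n
instance (lines : List String) (n : Int) (out : Int) : Decidable (Spec_reps lines n out) := by unfold Spec_reps; infer_instance

-- ===== CLAIM =====
def Claim_equal_reps : Prop := ∀ (lines : List String) (n : Int), Dom_reps lines n → Spec_reps lines n (reps lines n)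

-- ===== LEMMAS AND PROOFS =====

-- A's per-line test: n is a value of the Counter iff some character of the line occurs n times
lemma A_test_iff (line : String) (n : Int) :
    PySem.Set.contains
      (PySem.Set.ofList
        (line.toList.foldl (fun d letter => d.modify letter 0 (· + 1))
          (PySem.Dict.empty : PySem.Dict Char Int)).values) n = true
    ↔ ∃ k ∈ line.toList, (line.toList.count k : Int) = n := by
  have hctr : (line.toList.foldl (fun d letter => d.modify letter 0 (· + 1))
      (PySem.Dict.empty : PySem.Dict Char Int)) = PySem.Dict.counter line.toList := rfl
  have hvals : (PySem.Dict.counter line.toList).values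
      = (PySem.Set.ofList line.toList).map (fun k => (line.toList.count k : Int)) := by
    show ((PySem.Dict.counter line.toList).items.map (·.2)) = _
    rw [PySem.Dict.items_counter]
    simp [List.map_map, Function.comp]
  rw [hctr, hvals, PySem.Set.contains_iff, PySem.Set.mem_ofList, List.mem_map]
  constructor
  · rintro ⟨k, hk, hkn⟩
    exact ⟨k, (PySem.Set.mem_ofList _ _).mp hk, hkn⟩
  · rintro ⟨k, hk, hkn⟩
    exact ⟨k, (PySem.Set.mem_ofList _ _).mpr hk, hkn⟩

-- in a ≤-sorted list, the character heading the list does not occur after its leading run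
lemma not_mem_dropWhile (c : Char) (rest : List Char)
    (hp : (c :: rest).Pairwise (· ≤ ·)) :
    c ∉ rest.dropWhile (fun x => x == c) := by
  intro hmem
  cases hd : rest.dropWhile (fun x => x == c) with
  | nil => rw [hd] at hmem; exact absurd hmem (List.not_mem_nil)
  | cons d t =>
    have hdne : (d == c) = false := by
      have := List.head_dropWhile_not (p := fun x => x == c) (l := rest)
      simp only [hd] at this
      simpa using this (by simp)
    have hdc : d ≠ c := by simpa using hdne
    have hsub : (rest.dropWhile (fun x => x == c)).Sublist rest :=
      List.dropWhile_sublist _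
    have hrest : rest.Pairwise (· ≤ ·) := (List.pairwise_cons.mp hp).2
    have hpd : (d :: t).Pairwise (· ≤ ·) := hd ▸ hrest.sublist hsub
    have hcled : c ≤ d := by
      have hdmem : d ∈ rest := hsub.mem (hd ▸ List.mem_cons_self)
      exact (List.pairwise_cons.mp hp).1 d hdmem
    have hclt : c < d := lt_of_le_of_ne hcled (Ne.symm hdc)
    rw [hd] at hmem
    rcases List.mem_cons.mp hmem with h | h
    · exact hdc h.symm
    · have : d ≤ c := (List.pairwise_cons.mp hpd).1 c h
      exact absurd (lt_of_lt_of_le hclt this) (lt_irrefl c)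

lemma count_head_sorted (c : Char) (rest : List Char)
    (hp : (c :: rest).Pairwise (· ≤ ·)) :
    (c :: rest).count c = 1 + (rest.takeWhile (fun x => x == c)).length := by
  have hsplit : rest = rest.takeWhile (fun x => x == c) ++ rest.dropWhile (fun x => x == c) :=
    (List.takeWhile_append_dropWhile).symm
  have htake : (rest.takeWhile (fun x => x == c)).count c
      = (rest.takeWhile (fun x => x == c)).length := by
    apply List.count_eq_length.mpr
    intro b hb
    have hb' : (b == c) = true := List.mem_takeWhile_imp (p := fun x => x == c) hb
    exact (by simpa using hb' : b = c).symm
  have hdrop : (rest.dropWhile (fun x => x == c)).count c = 0 :=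
    List.count_eq_zero.mpr (not_mem_dropWhile c rest hp)
  calc (c :: rest).count c = rest.count c + 1 := by simp
    _ = 1 + (rest.takeWhile (fun x => x == c)).length := by
        conv_lhs => rw [hsplit]
        rw [List.count_append, htake, hdrop]
        omega

-- characters surviving the leading run have the same count in the tail as in the whole list
lemma count_drop_sorted (c k : Char) (rest : List Char)
    (hp : (c :: rest).Pairwise (· ≤ ·))
    (hk : k ∈ rest.dropWhile (fun x => x == c)) :
    (c :: rest).count k = (rest.dropWhile (fun x => x == c)).count k := by
  have hkc : k ≠ c := fun h => not_mem_dropWhile c rest hp (h ▸ hk)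
  have hsplit : rest = rest.takeWhile (fun x => x == c) ++ rest.dropWhile (fun x => x == c) :=
    (List.takeWhile_append_dropWhile).symm
  have htake : (rest.takeWhile (fun x => x == c)).count k = 0 := by
    apply List.count_eq_zero.mpr
    intro hmem
    have h' : (k == c) = true := List.mem_takeWhile_imp (p := fun x => x == c) hmem
    exact hkc (by simpa using h')
  rw [List.count_cons_of_ne (Ne.symm hkc)]
  conv_lhs => rw [hsplit]
  rw [List.count_append, htake]
  omega

-- the scan finds a run of length n iff some character of the sorted list occurs n times
lemma repsScan_iff_aux (n : Int) (N : Nat) :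
    ∀ s : List Char, s.length ≤ N → s.Pairwise (· ≤ ·) →
      (repsScan n s = true ↔ ∃ k ∈ s, (s.count k : Int) = n) := by
  induction N with
  | zero =>
    intro s hlen _
    have : s = [] := List.length_eq_zero_iff.mp (Nat.le_zero.mp hlen)
    subst this
    simp [repsScan]
  | succ N ih =>
    intro s hlen hp
    cases s with
    | nil => simp [repsScan]
    | cons c rest =>
      rw [repsScan]
      have hcnt := count_head_sorted c rest hp
      by_cases hif : ((1 : Int) + (rest.takeWhile (fun x => x == c)).length == n) = true
      · simp only [if_pos hif]
        constructor
        · intro _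
          refine ⟨c, List.mem_cons_self, ?_⟩
          rw [hcnt]
          have h' : (1 : Int) + (rest.takeWhile (fun x => x == c)).length = n := beq_iff_eq.mp hif
          push_cast
          omega
        · intro _; trivial
      · simp only [if_neg hif]
        have hrest : rest.Pairwise (· ≤ ·) := (List.pairwise_cons.mp hp).2
        have hdp : (rest.dropWhile (fun x => x == c)).Pairwise (· ≤ ·) :=
          hrest.sublist (List.dropWhile_sublist _)
        have hdlen : (rest.dropWhile (fun x => x == c)).length ≤ N := by
          have h1 := List.length_dropWhile_le (fun x => x == c) rest
          have h2 : rest.length ≤ N := by simpa using Nat.le_of_succ_le_succ hlen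
          omega
        rw [ih _ hdlen hdp]
        constructor
        · rintro ⟨k, hk, hkn⟩
          refine ⟨k, List.mem_cons.mpr (Or.inr ((List.dropWhile_sublist _).mem hk)), ?_⟩
          rw [count_drop_sorted c k rest hp hk]; exact hkn
        · rintro ⟨k, hk, hkn⟩
          by_cases hkin : k ∈ rest.dropWhile (fun x => x == c)
          · exact ⟨k, hkin, by rw [← count_drop_sorted c k rest hp hkin]; exact hkn⟩
          · exfalso
            have hkc : k = c := by
              rcases List.mem_cons.mp hk with h | h
              · exact h
              · have hsplit : rest = rest.takeWhile (fun x => x == c)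
                    ++ rest.dropWhile (fun x => x == c) :=
                  (List.takeWhile_append_dropWhile).symm
                rw [hsplit] at h
                rcases List.mem_append.mp h with h' | h'
                · have := List.mem_takeWhile_imp (p := fun x => x == c) h'
                  simpa using this
                · exact absurd h' hkin
            subst hkc
            rw [hcnt] at hkn
            apply hif
            rw [beq_iff_eq, ← hkn]
            push_cast
            ring

lemma repsScan_iff (n : Int) (s : List Char) (hp : s.Pairwise (· ≤ ·)) :
    repsScan n s = true ↔ ∃ k ∈ s, (s.count k : Int) = n :=
  repsScan_iff_aux n s.length s (le_refl _) hp

-- the two per-line tests agree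
lemma line_test_eq (line : String) (n : Int) :
    PySem.Set.contains
      (PySem.Set.ofList
        (line.toList.foldl (fun d letter => d.modify letter 0 (· + 1))
          (PySem.Dict.empty : PySem.Dict Char Int)).values) n
    = repsScan n (PySem.List.sorted line.toList (fun x => x) false) := by
  have hperm : (PySem.List.sorted line.toList (fun x => x) false).Perm line.toList :=
    PySem.List.sorted_perm _ _ _
  have hpair : (PySem.List.sorted line.toList (fun x => x) false).Pairwise (· ≤ ·) :=
    PySem.List.sorted_pairwise _ _
  rcases hb : repsScan n (PySem.List.sorted line.toList (fun x => x) false) with _ | _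
  · apply (Bool.eq_false_iff).mpr
    intro hc
    rcases (A_test_iff line n).mp hc with ⟨k, hk, hkn⟩
    have : repsScan n (PySem.List.sorted line.toList (fun x => x) false) = true := by
      rw [repsScan_iff n _ hpair]
      exact ⟨k, hperm.mem_iff.mpr hk, by rw [hperm.count_eq]; exact hkn⟩
    rw [hb] at this; exact Bool.false_ne_true this
  · rcases (repsScan_iff n _ hpair).mp hb with ⟨k, hk, hkn⟩
    apply (A_test_iff line n).mpr
    exact ⟨k, hperm.mem_iff.mp hk, by rw [← hperm.count_eq]; exact hkn⟩

lemma reps_fold_eq (lines : List String) (n : Int) :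
    ∀ acc : Int,
      lines.foldl (fun out line =>
        let cnt : PySem.Dict Char Int :=
          line.toList.foldl (fun d letter => d.modify letter 0 (· + 1)) PySem.Dict.empty
        if PySem.Set.contains (PySem.Set.ofList cnt.values) n then out + 1 else out) acc
      = lines.foldl (fun out line =>
          if repsScan n (PySem.List.sorted line.toList (fun x => x) false)
          then out + 1 else out) acc := by
  induction lines with
  | nil => intro acc; rfl
  | cons line rest ih =>
    intro acc
    simp only [List.foldl_cons]
    rw [ih]
    congr 1
    rw [line_test_eq line n]

-- ===== VERDICT =====
theorem reps_spec : Claim_equal_reps := by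
  intro lines n _
  unfold Spec_reps reps reps_alt
  exact reps_fold_eq lines n 0
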